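-- pv_equiv track=rewrite | github.com/razakadam74/Interview-Preparation | 14th/zeroDuplicates.py | zeroDuplications
-- ===== SOURCE A (Python) =====
-- def zeroDuplications(arr):
--     dict = {}
--     for idx, val in enumerate(arr):
--         if dict.get(str(val)):
--             arr[idx] = 0
--         else:
--             dict[str(val)] = 1
--     return arr
-- ===== SOURCE B (Python) =====
-- def zeroDuplications(arr):
--     # Two passes: record the first index of each str-key, then zero every
--     # position that is not its key's first occurrence. Mutates arr in place like A.
--     first = {}
--     for idx, val in enumerate(arr):
--         key = str(val)
--         if key not in first:
--             first[key] = idx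
--     for idx, val in enumerate(arr):
--         if first[str(val)] != idx:
--             arr[idx] = 0
--     return arr
-- ===== Notes on version B (the rewrite author's own statement) =====
-- stated objective: alternative
-- what changed: Replaces A's single pass that checks a truthiness dict and zeroes as it goes with two passes: one building a str(val)->first-index dict, then a second that zeroes every position that is not its key's first occurrence.
import Mathlib
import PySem

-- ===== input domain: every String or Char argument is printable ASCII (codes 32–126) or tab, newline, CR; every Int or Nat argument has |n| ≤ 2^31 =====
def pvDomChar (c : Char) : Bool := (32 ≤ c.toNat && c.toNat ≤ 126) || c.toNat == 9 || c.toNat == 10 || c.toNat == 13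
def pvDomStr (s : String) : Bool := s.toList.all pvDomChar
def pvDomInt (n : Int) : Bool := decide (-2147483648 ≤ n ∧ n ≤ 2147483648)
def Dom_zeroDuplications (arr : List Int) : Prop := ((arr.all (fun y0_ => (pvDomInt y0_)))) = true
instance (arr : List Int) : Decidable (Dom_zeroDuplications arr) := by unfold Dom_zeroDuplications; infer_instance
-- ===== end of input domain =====

-- B replaces A's single pass over a truthiness-checked 'seen' dict by two passes over a
-- first-occurrence-index dict (alternative decomposition, same cost). Both mutate arr in
-- place in Python; the equivalence proved here is about the returned list.

-- ===== PORT A =====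
-- loop body of A: `if dict.get(str(val)):` — get returns None (falsy) or the stored int 1,
-- so the truthiness test is exactly `getD … 0 ≠ 0`; `arr[idx] = 0` appends 0 at that position
def stepA (st : PySem.Dict String Int × List Int) (p : Int × Int) : PySem.Dict String Int × List Int :=
  if st.1.getD (PySem.Int.toStr p.2) 0 ≠ 0 then (st.1, st.2 ++ [0])
  else (st.1.insert (PySem.Int.toStr p.2) 1, st.2 ++ [p.2])

def zeroDuplications (arr : List Int) : List Int :=
  ((PySem.List.enumerate arr 0).foldl stepA (PySem.Dict.empty, [])).2

-- ===== PORT B =====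
-- first pass of B: `if key not in first: first[key] = idx`
def stepB (d : PySem.Dict String Int) (p : Int × Int) : PySem.Dict String Int :=
  if d.contains (PySem.Int.toStr p.2) then d else d.insert (PySem.Int.toStr p.2) p.1

def zeroDuplications_alt (arr : List Int) : List Int :=
  let first := (PySem.List.enumerate arr 0).foldl stepB PySem.Dict.empty
  -- `first[str(val)]` never raises (every key of arr was inserted by the first pass),
  -- so it is ported as getD with an unused default -1
  (PySem.List.enumerate arr 0).map
    (fun p => if first.getD (PySem.Int.toStr p.2) (-1) ≠ p.1 then 0 else p.2)

-- ===== PRECONDITION & SPEC =====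
def Spec_zeroDuplications (arr : List Int) (out : List Int) : Prop := out = zeroDuplications_alt arr
instance (arr : List Int) (out : List Int) : Decidable (Spec_zeroDuplications arr out) := by unfold Spec_zeroDuplications; infer_instance

-- ===== CLAIM (what is proved, stated in full; the proofs are below) =====
def Claim_equal_zeroDuplications : Prop := ∀ (arr : List Int), Dom_zeroDuplications arr → Spec_zeroDuplications arr (zeroDuplications arr)

-- ===== LEMMAS AND PROOFS =====

-- common specification: keep a value iff its str-key occurred before it
def zspec (seen : List String) : List Int → List Int
  | [] => []
  | v :: t => (if PySem.Int.toStr v ∈ seen then 0 else v) :: zspec (seen ++ [PySem.Int.toStr v]) t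

-- A's fold equals zspec, with the dict's truthy keys tracking the seen keys
theorem lemA : ∀ (t : List Int) (s : Int) (d : PySem.Dict String Int) (acc : List Int) (seen : List String),
    (∀ k, d.getD k 0 ≠ 0 ↔ k ∈ seen) →
    ((PySem.List.enumerate t s).foldl stepA (d, acc)).2 = acc ++ zspec seen t := by
  intro t
  induction t with
  | nil => intro s d acc seen _; simp [PySem.List.enumerate_nil, zspec]
  | cons v t ih =>
    intro s d acc seen hinv
    rw [PySem.List.enumerate_cons, List.foldl_cons]
    by_cases hm : PySem.Int.toStr v ∈ seen
    · have hgd : d.getD (PySem.Int.toStr v) 0 ≠ 0 := (hinv _).mpr hm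
      have hstep : stepA (d, acc) (s, v) = (d, acc ++ [0]) := by
        simp [stepA, hgd]
      rw [hstep, ih (s+1) d (acc ++ [0]) (seen ++ [PySem.Int.toStr v])
        (by intro k
            rw [hinv k]
            simp only [List.mem_append, List.mem_singleton]
            constructor
            · exact Or.inl
            · rintro (h|h)
              · exact h
              · exact h ▸ hm)]
      simp [zspec, hm]
    · have hgd : d.getD (PySem.Int.toStr v) 0 = 0 := by
        by_contra h; exact hm ((hinv _).mp h)
      have hstep : stepA (d, acc) (s, v) = (d.insert (PySem.Int.toStr v) 1, acc ++ [v]) := by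
        simp [stepA, hgd]
      rw [hstep, ih (s+1) _ (acc ++ [v]) (seen ++ [PySem.Int.toStr v]) ?_]
      · simp [zspec, hm]
      · intro k
        rw [PySem.Dict.getD_insert]
        by_cases hk : k = PySem.Int.toStr v <;> simp [hk, hinv k]

-- B's first pass: lookup in the built dict = first matching index in the pair list
theorem build_get : ∀ (l : List (Int × Int)) (d : PySem.Dict String Int) (k : String),
    (l.foldl stepB d).get? k =
      match d.get? k with
      | some j => some j
      | none => (l.find? (fun p => PySem.Int.toStr p.2 == k)).map (·.1) := by
  intro l
  induction l with
  | nil => intro d k; cases h : d.get? k <;> simp [h]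
  | cons p t ih =>
    intro d k
    rw [List.foldl_cons]
    by_cases hc : d.contains (PySem.Int.toStr p.2)
    · have hstep : stepB d p = d := by simp [stepB, hc]
      rw [hstep, ih d k]
      cases h : d.get? k with
      | some j => simp
      | none =>
        have hne : (PySem.Int.toStr p.2 == k) = false := by
          by_contra hx
          have : PySem.Int.toStr p.2 = k := by
            cases hb : (PySem.Int.toStr p.2 == k)
            · exact absurd hb hx
            · exact eq_of_beq hb
          rw [this] at hc
          rw [PySem.Dict.contains_eq_isSome_get?, h] at hc
          simp at hc
        simp [hne]
    · have hstep : stepB d p = d.insert (PySem.Int.toStr p.2) p.1 := by simp [stepB, hc]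
      rw [hstep, ih]
      rw [PySem.Dict.get?_insert]
      by_cases hk : k = PySem.Int.toStr p.2
      · have hdk : d.get? k = none := by
          rw [hk]
          rw [PySem.Dict.contains_eq_isSome_get?] at hc
          cases h : d.get? (PySem.Int.toStr p.2) <;> simp [h] at hc ⊢
        have hdk2 : d.get? (PySem.Int.toStr p.2) = none := hk ▸ hdk
        simp [hk, hdk2]
      · have hne : (PySem.Int.toStr p.2 == k) = false := by
          simp; exact fun h => hk h.symm
        simp only [if_neg hk]
        cases h : d.get? k <;> simp [hne]

-- B's second pass over the suffix t equals zspec of the prefix's keys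
theorem lemB (arr : List Int) : ∀ (t pre : List Int), arr = pre ++ t →
    (PySem.List.enumerate t (pre.length : Int)).map
      (fun p => if ((PySem.List.enumerate arr 0).foldl stepB PySem.Dict.empty).getD (PySem.Int.toStr p.2) (-1) ≠ p.1 then 0 else p.2)
    = zspec (pre.map PySem.Int.toStr) t := by
  intro t
  induction t with
  | nil => intro pre _; simp [PySem.List.enumerate_nil, zspec]
  | cons v t ih =>
    intro pre harr
    have hget : ((PySem.List.enumerate arr 0).foldl stepB PySem.Dict.empty).get? (PySem.Int.toStr v) =
        ((PySem.List.enumerate arr 0).find? (fun p => PySem.Int.toStr p.2 == PySem.Int.toStr v)).map (·.1) := by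
      rw [build_get]; simp [PySem.Dict.get?_empty]
    have hsplit : PySem.List.enumerate arr 0
        = PySem.List.enumerate pre 0 ++ PySem.List.enumerate (v :: t) (pre.length : Int) := by
      rw [harr, PySem.List.enumerate_append]; norm_num
    have hcons : (PySem.List.enumerate (v :: t) (pre.length : Int)).find?
        (fun p => PySem.Int.toStr p.2 == PySem.Int.toStr v) = some ((pre.length : Int), v) := by
      rw [PySem.List.enumerate_cons, List.find?_cons_of_pos]
      simp
    rw [PySem.List.enumerate_cons, List.map_cons]
    have htail : (PySem.List.enumerate t ((pre.length : Int) + 1)).map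
        (fun p => if ((PySem.List.enumerate arr 0).foldl stepB PySem.Dict.empty).getD (PySem.Int.toStr p.2) (-1) ≠ p.1 then 0 else p.2)
        = zspec ((pre ++ [v]).map PySem.Int.toStr) t := by
      have := ih (pre ++ [v]) (by rw [harr, List.append_assoc]; rfl)
      have hlen : (((pre ++ [v]).length : Nat) : Int) = (pre.length : Int) + 1 := by
        simp
      rw [hlen] at this
      exact this
    rw [htail]
    simp only [List.map_append, List.map_cons, List.map_nil, zspec]
    congr 1
    by_cases hm : PySem.Int.toStr v ∈ pre.map PySem.Int.toStr
    · -- first occurrence is inside pre: getD < pre.length, so zero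
      have hex : ∃ x ∈ PySem.List.enumerate pre 0, (PySem.Int.toStr x.2 == PySem.Int.toStr v) = true := by
        obtain ⟨w, hw, hkey⟩ := List.mem_map.mp hm
        obtain ⟨j, hj, hwj⟩ := List.mem_iff_getElem.mp hw
        exact ⟨((0 : Int) + j, pre[j]), (PySem.List.mem_enumerate_iff _ _ _).mpr ⟨j, hj, rfl⟩, by simp [hwj, hkey]⟩
      obtain ⟨a, ha⟩ := Option.isSome_iff_exists.mp (List.find?_isSome.mpr hex)
      have hmem : a ∈ PySem.List.enumerate pre 0 := List.mem_of_find?_eq_some ha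
      obtain ⟨j, hj, haj⟩ := (PySem.List.mem_enumerate_iff _ _ _).mp hmem
      have hlt : a.1 < (pre.length : Int) := by
        rw [haj]; simp; exact_mod_cast hj
      have hfind : (PySem.List.enumerate arr 0).find? (fun p => PySem.Int.toStr p.2 == PySem.Int.toStr v) = some a := by
        rw [hsplit, List.find?_append, ha]; rfl
      rw [hfind] at hget
      have hgd : ((PySem.List.enumerate arr 0).foldl stepB PySem.Dict.empty).getD (PySem.Int.toStr v) (-1) = a.1 := by
        rw [PySem.Dict.getD_eq_get?_getD, hget]; rfl
      rw [hgd]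
      simp [hm]
      omega
    · -- no earlier occurrence: getD = pre.length, so keep v
      have hnone : (PySem.List.enumerate pre 0).find? (fun p => PySem.Int.toStr p.2 == PySem.Int.toStr v) = none := by
        rw [List.find?_eq_none]
        intro x hx
        obtain ⟨j, hj, hxj⟩ := (PySem.List.mem_enumerate_iff _ _ _).mp hx
        simp [hxj]
        intro hc
        exact hm (List.mem_map.mpr ⟨pre[j], List.getElem_mem hj, hc⟩)
      have hfind : (PySem.List.enumerate arr 0).find? (fun p => PySem.Int.toStr p.2 == PySem.Int.toStr v) = some ((pre.length : Int), v) := by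
        rw [hsplit, List.find?_append, hnone, hcons]; rfl
      rw [hfind] at hget
      have hgd : ((PySem.List.enumerate arr 0).foldl stepB PySem.Dict.empty).getD (PySem.Int.toStr v) (-1) = (pre.length : Int) := by
        rw [PySem.Dict.getD_eq_get?_getD, hget]; rfl
      rw [hgd]
      simp [hm]

-- ===== VERDICT (by name: the statement is the Claim_ definition above) =====
theorem zeroDuplications_spec : Claim_equal_zeroDuplications := by
  intro arr _
  unfold Spec_zeroDuplications zeroDuplications zeroDuplications_alt
  rw [lemA arr 0 PySem.Dict.empty [] [] (by simp [PySem.Dict.getD_empty])]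
  simpa using (lemB arr arr [] rfl).symm
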